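-- pv_equiv track=rewrite | github.com/igfox/contextual_motifs | lib/data_derived_motifs.py | motif_candidates
-- ===== SOURCE A (Python) =====
-- def motif_candidates(data, motif_length, stride_length=1):
--     '''
--     Seperates unequal data chunks into possibly overlapping motif candidates
--     Inputs
--     data : list of pieces of contiguous data to be turned into candidates
--     motif_length : length of motif candidates
--     stride_length : amount of overlap between candidates (1 is max, motif_length is none)
--     Outputs
--     candidate_list : list of motif candidates
--     chunk_divs : index in list where chunk changes
--     '''
--     candidate_list = []
--     chunk_div = []
--     for chunk in data:
--         chunk_div.append(len(candidate_list))
--         assert(len(chunk) >= motif_length)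
--         for i in range(0, len(chunk)-motif_length, stride_length):
--             candidate_list.append(chunk[i:i+motif_length])
--     return candidate_list, chunk_div
-- ===== SOURCE B (Python) =====
-- def motif_candidates(data, motif_length, stride_length=1):
--     # Stage 1: per-chunk windows by peeling suffixes (no index arithmetic).
--     blocks = []
--     for chunk in data:
--         assert len(chunk) >= motif_length
--         windows = []
--         rest = chunk
--         while len(rest) - motif_length > 0:
--             windows.append(rest[:motif_length])
--             rest = rest[stride_length:]
--         blocks.append(windows)
--     # Stage 2: chunk divisions are the prefix sums of the window counts.
--     chunk_div = []
--     total = 0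
--     for windows in blocks:
--         chunk_div.append(total)
--         total += len(windows)
--     # Stage 3: flatten.
--     candidate_list = [w for windows in blocks for w in windows]
--     return candidate_list, chunk_div
-- ===== Notes on version B (the rewrite author's own statement) =====
-- stated objective: alternative
-- what changed: B generates each chunk's windows by repeatedly peeling the suffix (take motif_length, then drop stride_length) with no index/range arithmetic, and derives chunk_div in a separate prefix-sum pass over the per-chunk window counts before flattening, instead of A's single loop that slices by range indices and reads the running len(candidate_list).
-- outside the precondition, e.g. on motif_candidates([[1, 2, 3]], 1, -1): A returns ([], [0]), B returns ([[1]], [0]); on motif_candidates([[1, 2]], -1, 1): A returns ([[1], [], []], [0]), B does not finish within the time limit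
import Mathlib
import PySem

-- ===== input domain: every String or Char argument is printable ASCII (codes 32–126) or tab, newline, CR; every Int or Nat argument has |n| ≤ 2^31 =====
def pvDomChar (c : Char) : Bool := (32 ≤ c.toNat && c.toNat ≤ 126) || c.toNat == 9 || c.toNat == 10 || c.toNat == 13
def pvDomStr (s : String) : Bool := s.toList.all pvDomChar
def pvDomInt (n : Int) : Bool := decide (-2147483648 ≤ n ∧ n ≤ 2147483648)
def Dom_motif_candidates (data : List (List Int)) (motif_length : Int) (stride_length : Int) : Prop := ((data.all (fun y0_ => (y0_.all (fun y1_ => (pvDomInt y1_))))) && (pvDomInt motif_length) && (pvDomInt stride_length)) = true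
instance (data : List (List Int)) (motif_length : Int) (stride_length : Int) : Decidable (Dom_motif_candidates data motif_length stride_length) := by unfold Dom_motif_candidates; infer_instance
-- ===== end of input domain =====

-- B peels suffix windows per chunk and derives chunk_div by a separate prefix-sum pass; alternative decomposition, same result.

-- ===== PORT A =====
-- A: one loop over chunks; chunk_div records the running len(candidate_list), inner loop appends slices chunk[i:i+m] for i in range(0, len-m, s).
def motif_candidates (data : List (List Int)) (motif_length : Int) (stride_length : Int) : List (List Int) × List Int :=
  data.foldl
    (fun st chunk =>
      let cd := st.2 ++ [(st.1.length : Int)]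
      let cl := (PySem.List.pyRange 0 ((chunk.length : Int) - motif_length) stride_length).foldl
          (fun acc i => acc ++ [PySem.List.slice chunk (some i) (some (i + motif_length))]) st.1
      (cl, cd))
    ([], [])

-- ===== PORT B =====
-- Source B stage-1 inner while-loop: emit rest[:m], then rest = rest[s:], while len(rest) - m > 0.
-- The fuel chunk.length+1 only makes the loop total in Lean; inside Pre_ (s ≥ 1, m ≥ 0) it never runs out.
def mcPeel : Nat → List Int → Int → Int → List (List Int)
  | 0, _, _, _ => []
  | Nat.succ fuel, rest, m, s =>
    if (rest.length : Int) - m ≤ 0 then []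
    else PySem.List.slice rest none (some m) :: mcPeel fuel (PySem.List.slice rest (some s) none) m s

def motif_candidates_alt (data : List (List Int)) (motif_length : Int) (stride_length : Int) : List (List Int) × List Int :=
  let blocks := data.map (fun chunk => mcPeel (chunk.length + 1) chunk motif_length stride_length)
  let chunk_div := (blocks.foldl
      (fun (st : List Int × Int) w => (st.1 ++ [st.2], st.2 + (w.length : Int)))
      ([], 0)).1
  (blocks.flatten, chunk_div)

-- ===== PRECONDITION & SPEC =====
-- Pre_ excludes (a) chunks shorter than motif_length (A's assert raises AssertionError) and, for nonempty data,
-- (b) stride_length = 0 (A's range raises ValueError) and (c) the non-natural parameters stride_length < 0 and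
-- motif_length < 0, outside the function's natural domain (a stride is a positive step, a motif a nonnegative
-- length); on (c) A returns accidental range/slice artefacts there and B's peeling loop returns something else
-- or does not terminate (see the cites in the claim).
def Pre_motif_candidates (data : List (List Int)) (motif_length : Int) (stride_length : Int) : Prop :=
  (∀ chunk ∈ data, motif_length ≤ (chunk.length : Int)) ∧
    (data = [] ∨ (0 ≤ motif_length ∧ 1 ≤ stride_length))
instance (data : List (List Int)) (motif_length : Int) (stride_length : Int) : Decidable (Pre_motif_candidates data motif_length stride_length) := by unfold Pre_motif_candidates; infer_instance
def pvWitness_motif_candidates : List (List Int) × Int × Int := ([[1, 2, 3], [4, 5]], 2, 1)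

def Spec_motif_candidates (data : List (List Int)) (motif_length : Int) (stride_length : Int) (out : List (List Int) × List Int) : Prop := out = motif_candidates_alt data motif_length stride_length
instance (data : List (List Int)) (motif_length : Int) (stride_length : Int) (out : List (List Int) × List Int) : Decidable (Spec_motif_candidates data motif_length stride_length out) := by unfold Spec_motif_candidates; infer_instance

-- ===== CLAIM (what is proved, stated in full; the proofs are below) =====
def Claim_equal_motif_candidates : Prop := ∀ (data : List (List Int)) (motif_length : Int) (stride_length : Int), Dom_motif_candidates data motif_length stride_length → Pre_motif_candidates data motif_length stride_length → Spec_motif_candidates data motif_length stride_length (motif_candidates data motif_length stride_length)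

-- ===== LEMMAS AND PROOFS =====

-- A's per-chunk candidate list, written as a map over the index range
def mcCands (chunk : List Int) (motif_length : Int) (stride_length : Int) : List (List Int) :=
  (PySem.List.pyRange 0 ((chunk.length : Int) - motif_length) stride_length).map
    (fun i => PySem.List.slice chunk (some i) (some (i + motif_length)))

-- prefix sums of the counts of a list of per-chunk candidate lists, starting at t
def mcDivs (t : Int) : List (List (List Int)) → List Int
  | [] => []
  | c :: rest => t :: mcDivs (t + (c.length : Int)) rest

theorem foldl_append_map {α β : Type} (f : α → β) :
    ∀ (l : List α) (acc : List β),
      l.foldl (fun a x => a ++ [f x]) acc = acc ++ l.map f := by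
  intro l
  induction l with
  | nil => simp
  | cons x xs ih => intro acc; simp [List.foldl, ih]

-- range(a, b, s) with positive step starts with a and continues from a+s
theorem pyRange_cons_pos {a b s : Int} (hs : 0 < s) (hab : a < b) :
    PySem.List.pyRange a b s = a :: PySem.List.pyRange (a + s) b s := by
  rw [PySem.List.pyRange_of_pos _ _ hs, PySem.List.pyRange_of_pos _ _ hs]
  have hq0 : 0 ≤ (b - (a + s) + s - 1) / s := Int.ediv_nonneg (by omega) (by omega)
  have harg : b - a + s - 1 = (b - (a + s) + s - 1) + 1 * s := by ring
  have hdiv : (b - a + s - 1) / s = (b - (a + s) + s - 1) / s + 1 := by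
    rw [harg, Int.add_mul_ediv_right _ _ (by omega : s ≠ 0)]
  have htail : ∀ q : Nat,
      (List.range (q + 1)).map (fun k : Nat => a + s * (k : Int))
        = a :: (List.range q).map (fun k : Nat => a + s + s * (k : Int)) := by
    intro q
    rw [List.range_succ_eq_map, List.map_cons, List.map_map]
    refine congrArg₂ List.cons (by push_cast; ring) ?_
    refine List.map_congr_left ?_
    intro k _
    simp only [Function.comp_apply]
    push_cast
    ring
  by_cases hc : a + s < b
  · simp only [if_pos hab, if_pos hc, hdiv]
    rw [show ((b - (a + s) + s - 1) / s + 1).toNat = ((b - (a + s) + s - 1) / s).toNat + 1 from by omega]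
    exact htail _
  · have hq : (b - (a + s) + s - 1) / s = 0 := Int.ediv_eq_zero_of_lt (by omega) (by omega)
    simp only [if_pos hab, if_neg hc, hdiv, hq]
    simp

-- shifting a positive-step range by c shifts its elements
theorem pyRange_shift_pos {s : Int} (a b c : Int) (hs : 0 < s) :
    PySem.List.pyRange (a + c) (b + c) s = (PySem.List.pyRange a b s).map (· + c) := by
  rw [PySem.List.pyRange_of_pos _ _ hs, PySem.List.pyRange_of_pos _ _ hs, List.map_map]
  have hiff : a + c < b + c ↔ a < b := by omega
  have hsub : b + c - (a + c) = b - a := by ring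
  simp only [hiff, hsub]
  refine List.map_congr_left ?_
  intro k _
  simp only [Function.comp_apply]
  ring

-- the tail of A's slice map over range(s, b, s) is the same map over the dropped chunk
theorem map_slice_shift (chunk : List Int) (m s b : Int) (hm : 0 ≤ m) (hs : 1 ≤ s) :
    (PySem.List.pyRange s b s).map (fun i => PySem.List.slice chunk (some i) (some (i + m)))
      = (PySem.List.pyRange 0 (b - s) s).map
          (fun i => PySem.List.slice (chunk.drop s.toNat) (some i) (some (i + m))) := by
  have h0 : PySem.List.pyRange s b s = (PySem.List.pyRange 0 (b - s) s).map (· + s) := by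
    have := pyRange_shift_pos 0 (b - s) s (by omega : (0:Int) < s)
    simpa using this
  rw [h0, List.map_map]
  refine List.map_congr_left ?_
  intro i hi
  have hi0 : 0 ≤ i := ((PySem.List.mem_pyRange_iff_of_pos (by omega) i).mp hi).1
  simp only [Function.comp_apply]
  rw [PySem.List.slice_toNat _ (by omega) (by omega), PySem.List.slice_toNat _ (by omega) (by omega),
      List.drop_drop]
  congr 1 <;> first | omega | (congr 1; omega)

-- B's peeling loop computes exactly A's per-chunk slice list (for m ≥ 0, s ≥ 1, enough fuel)
theorem mcPeel_eq (m s : Int) (hm : 0 ≤ m) (hs : 1 ≤ s) :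
    ∀ (fuel : Nat) (chunk : List Int), chunk.length < fuel →
      mcPeel fuel chunk m s = mcCands chunk m s := by
  intro fuel
  induction fuel with
  | zero => intro chunk h; omega
  | succ fuel ih =>
    intro chunk h
    by_cases hend : (chunk.length : Int) - m ≤ 0
    · simp only [mcPeel, if_pos hend, mcCands]
      rw [PySem.List.pyRange_of_pos _ _ (by omega : (0:Int) < s)]
      rw [if_neg (by omega : ¬ (0:Int) < (chunk.length : Int) - m)]
      simp
    · have hlen : 0 < chunk.length := by omega
      have hdroplen : (PySem.List.slice chunk (some s) none).length < fuel := by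
        rw [PySem.List.slice_from _ (by omega : 0 ≤ s), List.length_drop]
        omega
      simp only [mcPeel, if_neg hend]
      rw [ih _ hdroplen]
      unfold mcCands
      rw [pyRange_cons_pos (by omega : (0:Int) < s) (by omega : (0:Int) < (chunk.length : Int) - m)]
      rw [List.map_cons]
      simp only [zero_add, PySem.List.slice_zero_start]
      rw [map_slice_shift chunk m s _ hm hs]
      rw [PySem.List.slice_from _ (by omega : 0 ≤ s)]
      refine congrArg₂ List.cons rfl ?_
      · rw [List.length_drop]
        by_cases hsl : s.toNat ≤ chunk.length
        · rw [show ((chunk.length - s.toNat : Nat) : Int) - m = (chunk.length : Int) - m - s from by omega]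
        · have h1 : (chunk.length : Int) - m - s < 0 := by omega
          have h2 : ((chunk.length - s.toNat : Nat) : Int) - m ≤ 0 := by omega
          rw [PySem.List.pyRange_of_pos _ _ (by omega : (0:Int) < s),
              PySem.List.pyRange_of_pos _ _ (by omega : (0:Int) < s)]
          rw [if_neg (by omega), if_neg (by omega)]

-- A's fold, closed form: candidates are the flattened per-chunk lists, divisions their prefix sums
theorem foldA_eq (motif_length stride_length : Int) :
    ∀ (data : List (List Int)) (cl : List (List Int)) (cd : List Int),
      data.foldl
        (fun st chunk =>
          let cd' := st.2 ++ [(st.1.length : Int)]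
          let cl' := (PySem.List.pyRange 0 ((chunk.length : Int) - motif_length) stride_length).foldl
              (fun acc i => acc ++ [PySem.List.slice chunk (some i) (some (i + motif_length))]) st.1
          (cl', cd'))
        (cl, cd)
      = (cl ++ (data.map (fun chunk => mcCands chunk motif_length stride_length)).flatten,
         cd ++ mcDivs (cl.length : Int) (data.map (fun chunk => mcCands chunk motif_length stride_length))) := by
  intro data
  induction data with
  | nil => intro cl cd; simp [mcDivs]
  | cons chunk rest ih =>
      intro cl cd
      simp only [List.foldl]
      rw [foldl_append_map]
      rw [ih]
      simp [mcCands, mcDivs, List.append_assoc]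

-- B's stage-2 fold computes the same prefix sums
theorem foldB_eq :
    ∀ (per : List (List (List Int))) (cd : List Int) (t : Int),
      (per.foldl (fun (st : List Int × Int) w => (st.1 ++ [st.2], st.2 + (w.length : Int))) (cd, t)).1
        = cd ++ mcDivs t per := by
  intro per
  induction per with
  | nil => intro cd t; simp [mcDivs]
  | cons c rest ih => intro cd t; simp [List.foldl, mcDivs, ih]

-- ===== VERDICT (by name: the statement is the Claim_ definition above) =====
theorem motif_candidates_spec : Claim_equal_motif_candidates := by
  intro data motif_length stride_length _ hpre
  unfold Spec_motif_candidates motif_candidates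
  rw [foldA_eq]
  rcases hpre.2 with hnil | ⟨hm, hs⟩
  · subst hnil
    simp [motif_candidates_alt, mcDivs]
  · have hblocks : data.map (fun chunk => mcPeel (chunk.length + 1) chunk motif_length stride_length)
        = data.map (fun chunk => mcCands chunk motif_length stride_length) := by
      refine List.map_congr_left ?_
      intro chunk _
      exact mcPeel_eq motif_length stride_length hm hs _ chunk (Nat.lt_succ_self _)
    simp only [motif_candidates_alt, hblocks, foldB_eq]
    simp
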